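-- pv_equiv track=rewrite | github.com/Rishabh5903/Competitive_Programming | Codeforces/Extra problems/884d.py | get_min_distinct_chars
-- ===== SOURCE A (Python) =====
-- import math
--
-- def get_min_distinct_chars(n):
--     # Calculate the distinct factors of n/2
--     factors = set()
--     for i in range(1, int(math.sqrt(n // 2)) + 1):
--         if (n // 2) % i == 0:
--             factors.add(i)
--             factors.add((n // 2) // i)
--
--     factors = sorted(factors)
--
--     # Generate the string with distinct characters
--     result = []
--     for factor in factors:
--         for i in range(factor):
--             result.append(chr(ord('a') + i))
--         for i in range(factor):
--             result.append(chr(ord('a') + i))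
--
--     # If n is odd, add an extra character
--     if n % 2 != 0:
--         result.append('a')
--
--     return ''.join(result)
-- ===== SOURCE B (Python) =====
-- def get_min_distinct_chars(n):
--     m = n // 2
--     # Single linear pass over 1..m: grow the alphabet prefix one letter per step
--     # and snapshot it (doubled) at each divisor -- no sqrt, no cofactors, no set, no sort.
--     out = []
--     alphabet = []
--     for i in range(1, m + 1):
--         alphabet.append(chr(ord('a') + i - 1))
--         if m % i == 0:
--             block = ''.join(alphabet)
--             out.append(block)
--             out.append(block)
--     if n % 2 != 0:
--         out.append('a')
--     return ''.join(out)
-- ===== Notes on version B (the rewrite author's own statement) =====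
-- stated objective: alternative
-- what changed: A finds the divisors of m=n//2 by sqrt-bounded trial division collecting i and m//i into a set, sorts them, and re-generates each character block with two nested chr loops; B makes one linear pass i=1..m that grows an alphabet prefix by one letter per step and, whenever i divides m, snapshots that prefix twice -- no sqrt, no cofactors, no set, no sort, no nested character loops (both are O(output) overall since the output has length 2*sigma(m)).
-- outside the precondition, e.g. on get_min_distinct_chars(-3): A raises ValueError, B returns 'a'
import Mathlib
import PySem

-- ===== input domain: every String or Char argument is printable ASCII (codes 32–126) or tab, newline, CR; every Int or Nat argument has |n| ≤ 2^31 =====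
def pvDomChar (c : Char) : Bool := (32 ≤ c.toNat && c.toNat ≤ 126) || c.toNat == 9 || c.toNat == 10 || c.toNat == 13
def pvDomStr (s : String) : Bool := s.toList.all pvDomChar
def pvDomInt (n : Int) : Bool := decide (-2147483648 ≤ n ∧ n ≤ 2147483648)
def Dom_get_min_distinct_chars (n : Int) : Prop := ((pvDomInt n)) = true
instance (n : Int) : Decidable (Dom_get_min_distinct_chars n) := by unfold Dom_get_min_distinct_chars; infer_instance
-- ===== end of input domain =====

-- B replaces A's sqrt-bounded trial division + set + sort + nested chr loops by ONE linear pass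
-- i = 1..m that grows an alphabet prefix one letter per step and snapshots it (doubled) at each
-- divisor — same output (objective: alternative; both are O(output) overall).

-- chr(ord('a') + i): exact for 0 ≤ i with 97 + i a valid non-surrogate code point (Pre_ guarantees this)
def pvChr (i : Int) : Char := Char.ofNat (97 + i.toNat)
-- chr(ord('a') + i - 1), used by B (its loop has i ≥ 1); exact under Pre_ for the same reason
def pvChrB (i : Int) : Char := Char.ofNat (97 + (i - 1).toNat)

-- ===== PORT A =====
-- int(math.sqrt(n // 2)) is ported as Nat.sqrt of the toNat: exact for 0 ≤ n//2 ≤ 2^31 (float sqrt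
-- rounds exactly there); for n // 2 < 0 Python raises ValueError — excluded by Pre_.
-- Python strings are carried as List Char; result.append / ''.join become list append / String.ofList.
def get_min_distinct_chars (n : Int) : String :=
  let factors : PySem.Set Int :=
    (PySem.List.pyRange 1 ((((PySem.Int.floordiv n 2).toNat.sqrt : Nat) : Int) + 1) 1).foldl
      (fun factors i =>
        if PySem.Int.mod (PySem.Int.floordiv n 2) i = 0 then
          PySem.Set.add (PySem.Set.add factors i)
            (PySem.Int.floordiv (PySem.Int.floordiv n 2) i)
        else factors)
      PySem.Set.empty
  let factors2 : List Int := PySem.List.sorted factors (fun x => x) false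
  let result : List Char :=
    factors2.foldl
      (fun result factor =>
        let result := (PySem.List.pyRange 0 factor 1).foldl (fun r i => r ++ [pvChr i]) result
        (PySem.List.pyRange 0 factor 1).foldl (fun r i => r ++ [pvChr i]) result)
      []
  let result := if PySem.Int.mod n 2 ≠ 0 then result ++ ['a'] else result
  String.ofList result

-- ===== PORT B =====
-- One foldl over range(1, m+1) carrying the pair (alphabet, out); ''.join(alphabet) snapshots the
-- current prefix (Python strings carried as List Char), the final ''.join is flatten + String.ofList.
def get_min_distinct_chars_alt (n : Int) : String :=
  let m := PySem.Int.floordiv n 2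
  let st :=
    (PySem.List.pyRange 1 (m + 1) 1).foldl
      (fun (st : List Char × List (List Char)) i =>
        let alphabet := st.1 ++ [pvChrB i]
        let out := if PySem.Int.mod m i = 0 then st.2 ++ [alphabet, alphabet] else st.2
        (alphabet, out))
      ([], [])
  let out := if PySem.Int.mod n 2 ≠ 0 then st.2 ++ [['a']] else st.2
  String.ofList out.flatten

-- ===== PRECONDITION & SPEC =====
-- Pre_ excludes: n < 0, where A raises ValueError (math.sqrt of a negative); n ≥ 2228032, where
-- chr raises ValueError in both programs; and 110400 ≤ n ≤ 2228031, where A's returned str contains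
-- lone-surrogate code points (U+D800–U+DFFF) and so is not a value of the declared Lean return type
-- String (Unicode scalar values only) — B's Python returns the identical str on that whole band.
def Pre_get_min_distinct_chars (n : Int) : Prop := 0 ≤ n ∧ n ≤ 110399
instance (n : Int) : Decidable (Pre_get_min_distinct_chars n) := by
  unfold Pre_get_min_distinct_chars; infer_instance
def pvWitness_get_min_distinct_chars : Int := 12
def Spec_get_min_distinct_chars (n : Int) (out : String) : Prop := out = get_min_distinct_chars_alt n
instance (n : Int) (out : String) : Decidable (Spec_get_min_distinct_chars n out) := by
  unfold Spec_get_min_distinct_chars; infer_instance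

-- ===== CLAIM (what is proved, stated in full; the proofs are below) =====
def Claim_equal_get_min_distinct_chars : Prop := ∀ (n : Int), Dom_get_min_distinct_chars n → Pre_get_min_distinct_chars n → Spec_get_min_distinct_chars n (get_min_distinct_chars n)

-- ===== LEMMAS AND PROOFS =====

lemma pv_cof_pos (m i : Int) (hm : 1 ≤ m) (hi : 1 ≤ i) (hd : i ∣ m) : 1 ≤ m / i := by
  have h := Int.ediv_mul_cancel hd
  nlinarith

lemma pv_sqrt_sq_le (m : Int) (hm : 0 ≤ m) : (m.toNat.sqrt : Int) * (m.toNat.sqrt : Int) ≤ m := by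
  have h := Nat.sqrt_le' m.toNat
  rw [pow_two] at h
  omega

lemma pv_lt_succ_sqrt (m : Int) (hm : 0 ≤ m) :
    m < ((m.toNat.sqrt : Int) + 1) * ((m.toNat.sqrt : Int) + 1) := by
  have h := Nat.lt_succ_sqrt m.toNat
  have h' : ((m.toNat : Nat) : Int) < ((m.toNat.sqrt.succ * m.toNat.sqrt.succ : Nat) : Int) := by
    exact_mod_cast h
  push_cast at h'
  rw [Int.toNat_of_nonneg hm] at h'
  linarith

-- membership in A's divisor set (the foldl over the sqrt-bounded range)
lemma pv_afold_mem (m : Int) (l : List Int) (s : PySem.Set Int) (x : Int) :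
    x ∈ l.foldl
      (fun factors i =>
        if PySem.Int.mod m i = 0 then
          PySem.Set.add (PySem.Set.add factors i) (PySem.Int.floordiv m i)
        else factors) s
    ↔ x ∈ s ∨ ∃ i ∈ l, PySem.Int.mod m i = 0 ∧ (x = i ∨ x = PySem.Int.floordiv m i) := by
  induction l generalizing s with
  | nil => simp
  | cons a t ih =>
    simp only [List.foldl_cons]
    by_cases h1 : PySem.Int.mod m a = 0
    · rw [if_pos h1, ih]
      simp [PySem.Set.mem_add, h1, or_assoc]
    · rw [if_neg h1, ih]
      simp [h1]

lemma pv_afold_nodup (m : Int) (l : List Int) (s : PySem.Set Int) (hs : s.Nodup) :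
    (l.foldl
      (fun factors i =>
        if PySem.Int.mod m i = 0 then
          PySem.Set.add (PySem.Set.add factors i) (PySem.Int.floordiv m i)
        else factors) s).Nodup := by
  induction l generalizing s with
  | nil => exact hs
  | cons a t ih =>
    simp only [List.foldl_cons]
    by_cases h1 : PySem.Int.mod m a = 0
    · rw [if_pos h1]
      exact ih _ (PySem.Set.nodup_add _ _ (PySem.Set.nodup_add _ _ hs))
    · rw [if_neg h1]
      exact ih _ hs

-- B's divisor list: the whole range 1..m filtered by divisibility
def pvDivs (m : Int) : List Int :=
  (PySem.List.pyRange 1 (m + 1) 1).filter (fun i => decide (PySem.Int.mod m i = 0))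

lemma pv_mem_divs (m x : Int) (_hm : 0 ≤ m) :
    x ∈ pvDivs m ↔ 1 ≤ x ∧ x ≤ m ∧ x ∣ m := by
  simp only [pvDivs, List.mem_filter, PySem.List.mem_pyRange_one, decide_eq_true_eq,
    PySem.Int.mod_eq_zero_iff_dvd, Int.lt_add_one_iff, and_assoc]

-- the sqrt-paired membership condition names exactly the divisors 1..m
lemma pv_pair_iff (m x : Int) (hm : 0 ≤ m) :
    (∃ i, (1 ≤ i ∧ i < (m.toNat.sqrt : Int) + 1) ∧ PySem.Int.mod m i = 0 ∧
        (x = i ∨ x = PySem.Int.floordiv m i))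
    ↔ (1 ≤ x ∧ x ≤ m ∧ x ∣ m) := by
  have hsq := pv_sqrt_sq_le m hm
  constructor
  · rintro ⟨i, ⟨h1, h2⟩, h3, hx⟩
    have h2' : i ≤ (m.toNat.sqrt : Int) := by omega
    have hd : i ∣ m := (PySem.Int.mod_eq_zero_iff_dvd m i).1 h3
    have hm1 : 1 ≤ m := by nlinarith
    have hfd : PySem.Int.floordiv m i = m / i := PySem.Int.floordiv_eq_ediv_of_pos (by omega)
    have hmul : m / i * i = m := Int.ediv_mul_cancel hd
    have hq1 : 1 ≤ m / i := pv_cof_pos m i hm1 h1 hd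
    rcases hx with rfl | rfl
    · exact ⟨h1, by nlinarith, hd⟩
    · rw [hfd]
      exact ⟨hq1, by nlinarith, ⟨i, hmul.symm⟩⟩
  · rintro ⟨h1, h2, hd⟩
    have hm1 : 1 ≤ m := by omega
    have h3 : PySem.Int.mod m x = 0 := (PySem.Int.mod_eq_zero_iff_dvd m x).2 hd
    by_cases hle : x ≤ (m.toNat.sqrt : Int)
    · exact ⟨x, ⟨h1, by omega⟩, h3, Or.inl rfl⟩
    · push Not at hle
      have hq1 : 1 ≤ m / x := pv_cof_pos m x hm1 h1 hd
      have hmul : m / x * x = m := Int.ediv_mul_cancel hd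
      have hqle : m / x ≤ (m.toNat.sqrt : Int) := by
        by_contra hgt
        push Not at hgt
        have := pv_lt_succ_sqrt m hm
        nlinarith
      have hqd : (m / x) ∣ m := ⟨x, hmul.symm⟩
      have h3' : PySem.Int.mod m (m / x) = 0 := (PySem.Int.mod_eq_zero_iff_dvd m _).2 hqd
      refine ⟨m / x, ⟨hq1, by omega⟩, h3', Or.inr ?_⟩
      rw [PySem.Int.floordiv_eq_ediv_of_pos (by omega)]
      have hx0 : m / x ≠ 0 := by omega
      have hcanc : (m / x) * x / (m / x) = x := Int.mul_ediv_cancel_left x hx0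
      rw [hmul] at hcanc
      exact hcanc.symm

-- A's sorted set of divisors IS B's linear filter
lemma pv_divs_eq (m : Int) (hm : 0 ≤ m) :
    PySem.List.sorted
      ((PySem.List.pyRange 1 ((m.toNat.sqrt : Int) + 1) 1).foldl
        (fun factors i =>
          if PySem.Int.mod m i = 0 then
            PySem.Set.add (PySem.Set.add factors i) (PySem.Int.floordiv m i)
          else factors) PySem.Set.empty)
      (fun x => x)
    = pvDivs m := by
  apply PySem.List.sorted_eq_of_perm_of_pairwise_lt
  · rw [List.perm_ext_iff_of_nodup]
    · intro x
      rw [pv_afold_mem, pv_mem_divs m x hm]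
      simp only [PySem.List.mem_pyRange_one, PySem.Set.empty, List.not_mem_nil, false_or]
      have := pv_pair_iff m x hm
      simpa using this.symm
    · have hp : (pvDivs m).Pairwise (· < ·) :=
        List.Pairwise.sublist List.filter_sublist (PySem.List.pairwise_lt_pyRange_one _ _)
      exact hp.imp (fun h => ne_of_lt h)
    · exact pv_afold_nodup m _ _ (by simp [PySem.Set.empty])
  · exact List.Pairwise.sublist List.filter_sublist (PySem.List.pairwise_lt_pyRange_one _ _)

-- A's character block for a divisor d
def pvBlkA (d : Int) : List Char := (PySem.List.pyRange 0 d 1).map pvChr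
-- B's alphabet prefix after step d
def pvBlkB (d : Int) : List Char := (PySem.List.pyRange 1 (d + 1) 1).map pvChrB

lemma pv_blk_eq (d : Int) : pvBlkA d = pvBlkB d := by
  unfold pvBlkA pvBlkB
  rw [PySem.List.pyRange_one 0 d, PySem.List.pyRange_one 1 (d + 1), List.map_map, List.map_map]
  have hlen : (d - 0).toNat = (d + 1 - 1).toNat := by omega
  rw [hlen]
  apply List.map_congr_left
  intro k _
  simp only [Function.comp_apply, pvChr, pvChrB]
  congr 1
  omega

-- A's nested character loops emit, per divisor, the doubled block
lemma pv_emitA (D : List Int) :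
    D.foldl
      (fun result factor =>
        let result := (PySem.List.pyRange 0 factor 1).foldl (fun r i => r ++ [pvChr i]) result
        (PySem.List.pyRange 0 factor 1).foldl (fun r i => r ++ [pvChr i]) result)
      []
    = D.flatMap (fun d => pvBlkA d ++ pvBlkA d) := by
  have h : ∀ (acc : List Char), ∀ d ∈ D,
      (let r := (PySem.List.pyRange 0 d 1).foldl (fun r i => r ++ [pvChr i]) acc
       (PySem.List.pyRange 0 d 1).foldl (fun r i => r ++ [pvChr i]) r)
      = acc ++ (pvBlkA d ++ pvBlkA d) := by
    intro acc d _
    simp only [PySem.List.foldl_append_singleton_eq_map, List.append_assoc, pvBlkA]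
  rw [PySem.List.foldl_congr_mem _ _ _ _ h, PySem.List.foldl_append_eq_flatMap]
  simp

-- B's single pass: the state after folding range(1, k+1) is the full alphabet prefix paired with
-- the doubled snapshot blocks of the divisors seen so far
lemma pv_bfold (m : Int) (k : Nat) :
    (PySem.List.pyRange 1 ((k : Int) + 1) 1).foldl
      (fun (st : List Char × List (List Char)) i =>
        let alphabet := st.1 ++ [pvChrB i]
        let out := if PySem.Int.mod m i = 0 then st.2 ++ [alphabet, alphabet] else st.2
        (alphabet, out))
      ([], [])
    = (pvBlkB (k : Int),
       ((PySem.List.pyRange 1 ((k : Int) + 1) 1).filter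
          (fun i => decide (PySem.Int.mod m i = 0))).flatMap (fun d => [pvBlkB d, pvBlkB d])) := by
  induction k with
  | zero =>
    simp [pvBlkB]
  | succ k ih =>
    have hsplit : PySem.List.pyRange 1 ((k + 1 : Nat) : Int) 1 ++ [((k + 1 : Nat) : Int)]
        = PySem.List.pyRange 1 (((k + 1 : Nat) : Int) + 1) 1 := by
      rw [← PySem.List.pyRange_one_succ_right (by push_cast; omega)]
    have hcast : ((k + 1 : Nat) : Int) = (k : Int) + 1 := by push_cast; ring
    rw [← hsplit, List.foldl_append, List.filter_append, List.flatMap_append]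
    rw [hcast, ih]
    have halpha : pvBlkB ((k : Int)) ++ [pvChrB ((k : Int) + 1)] = pvBlkB ((k : Int) + 1) := by
      unfold pvBlkB
      rw [PySem.List.pyRange_one_succ_right (by omega : (1:Int) ≤ (k : Int) + 1)]
      simp
    simp only [List.foldl_cons, List.foldl_nil, List.filter_cons, List.filter_nil]
    by_cases hdiv : ((k : Int) + 1) ∣ m
    · simp [hdiv, halpha]
    · simp [hdiv, halpha]

-- flattening doubled singleton blocks
lemma pv_flatten_double (g : Int → List Char) (L : List Int) :
    (L.flatMap (fun d => [g d, g d])).flatten = L.flatMap (fun d => g d ++ g d) := by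
  induction L with
  | nil => rfl
  | cons a t ih => simp [List.flatMap_cons, ih]

theorem pv_main (n : Int) (hp : 0 ≤ n ∧ n ≤ 110399) :
    get_min_distinct_chars n = get_min_distinct_chars_alt n := by
  have hm : 0 ≤ PySem.Int.floordiv n 2 := by
    rw [PySem.Int.floordiv_eq_ediv_of_pos (by omega : (0:Int) < 2)]
    exact Int.ediv_nonneg hp.1 (by omega)
  set m := PySem.Int.floordiv n 2 with hmdef
  have hcast : m + 1 = ((m.toNat : Int)) + 1 := by omega
  unfold get_min_distinct_chars get_min_distinct_chars_alt
  rw [← hmdef]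
  simp only [pv_divs_eq m hm, pv_emitA, hcast, pv_bfold m m.toNat]
  have hdv : (PySem.List.pyRange 1 ((m.toNat : Int) + 1) 1).filter
      (fun i => decide (PySem.Int.mod m i = 0)) = pvDivs m := by
    unfold pvDivs
    rw [← hcast]
  rw [hdv]
  split_ifs <;>
    simp [pv_flatten_double, pv_blk_eq]

-- ===== VERDICT (by name: the statement is the Claim_ definition above) =====
theorem get_min_distinct_chars_spec : Claim_equal_get_min_distinct_chars := by
  intro n _ hp
  unfold Pre_get_min_distinct_chars at hp
  unfold Spec_get_min_distinct_chars
  exact pv_main n hp
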